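-- pv_equiv track=rewrite | github.com/kvm777/python-codes-for-practice | unknown/INFOSYS/uniqueSums.py | SumsOfSubarrays
-- ===== SOURCE A (Python) =====
-- def SumsOfSubarrays(arr):
--     n = len(arr)
--     out = []
--     for i in range(n):
--         for j in range(i + 1, n + 1):
--             s = sum(arr[i:j])
--             if s not in out:
--                 out.append(s)
--     return len(out)
--
--
--     ...
-- ===== SOURCE B (Python) =====
-- def SumsOfSubarrays(arr):
--     # prefix sums: every subarray sum is pref[j] - pref[i] (i < j); count distinct with a set
--     pref = [0]
--     s = 0
--     for x in arr:
--         s += x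
--         pref.append(s)
--     sums = {pj - pi for i, pi in enumerate(pref) for pj in pref[i + 1:]}
--     return len(sums)
-- ===== Notes on version B (the rewrite author's own statement) =====
-- stated objective: faster
-- what changed: B builds prefix sums once and counts distinct pairwise differences pref[j]-pref[i] with a set, instead of A's re-summing every slice and scanning a list for membership.
import Mathlib
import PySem

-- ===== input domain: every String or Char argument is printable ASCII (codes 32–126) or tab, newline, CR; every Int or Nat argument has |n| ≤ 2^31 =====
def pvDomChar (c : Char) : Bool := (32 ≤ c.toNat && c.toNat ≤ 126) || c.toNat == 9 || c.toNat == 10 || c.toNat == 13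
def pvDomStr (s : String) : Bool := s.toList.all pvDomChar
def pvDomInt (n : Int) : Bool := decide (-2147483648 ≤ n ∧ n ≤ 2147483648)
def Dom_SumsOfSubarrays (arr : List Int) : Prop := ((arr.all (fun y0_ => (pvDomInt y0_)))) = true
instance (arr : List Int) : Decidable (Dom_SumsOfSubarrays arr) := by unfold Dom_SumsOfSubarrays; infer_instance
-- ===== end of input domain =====

-- B replaces A's re-summing of every slice and linear list-membership test by prefix sums and a set (faster).

-- ===== PORT A =====
def SumsOfSubarrays (arr : List Int) : Int :=
  let n : Int := arr.length
  let out : List Int :=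
    (PySem.List.pyRange 0 n 1).foldl (fun out i =>
      (PySem.List.pyRange (i + 1) (n + 1) 1).foldl (fun out j =>
        let s := (PySem.List.slice arr (some i) (some j)).sum
        if out.contains s then out else out ++ [s]) out) []
  (out.length : Int)

-- ===== PORT B =====
def SumsOfSubarrays_alt (arr : List Int) : Int :=
  let ps := arr.foldl (fun (p : List Int × Int) x => (p.1 ++ [p.2 + x], p.2 + x)) ([0], 0)
  let pref := ps.1
  let sums : PySem.Set Int :=
    PySem.Set.ofList ((PySem.List.enumerate pref).flatMap (fun ip =>
      (PySem.List.slice pref (some (ip.1 + 1)) none).map (fun pj => pj - ip.2)))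
  PySem.Set.len sums

-- ===== PRECONDITION & SPEC =====
def Spec_SumsOfSubarrays (arr : List Int) (out : Int) : Prop := out = SumsOfSubarrays_alt arr
instance (arr : List Int) (out : Int) : Decidable (Spec_SumsOfSubarrays arr out) := by unfold Spec_SumsOfSubarrays; infer_instance

-- ===== CLAIM (what is proved, stated in full; the proofs are below) =====
def Claim_equal_SumsOfSubarrays : Prop := ∀ (arr : List Int), Dom_SumsOfSubarrays arr → Spec_SumsOfSubarrays arr (SumsOfSubarrays arr)

-- ===== LEMMAS AND PROOFS =====

-- pvT s l = the running partial sums s+l0, s+l0+l1, …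
def pvT (s : Int) : List Int → List Int
  | [] => []
  | x :: xs => (s + x) :: pvT (s + x) xs

-- pvF p = for every element of p, all later elements minus it, in order
def pvF : List Int → List Int
  | [] => []
  | p :: q => q.map (fun y => y - p) ++ pvF q

def pvG'' : List Int → List Int
  | [] => []
  | _ :: xs => pvT 0 xs ++ pvG'' xs

-- pvG arr = the sums of all contiguous subarrays, start ascending then end ascending
def pvG : List Int → List Int
  | [] => []
  | x :: xs => pvT 0 (x :: xs) ++ pvG xs

theorem pv_foldl_flatMap {α β γ : Type} (l : List α) (f : α → List β) (g : γ → β → γ) (init : γ) :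
    (l.flatMap f).foldl g init = l.foldl (fun a b => (f b).foldl g a) init := by
  induction l generalizing init with
  | nil => rfl
  | cons x xs ih => simp [List.foldl_append, ih]

theorem pv_add_eq (out : List Int) (s : Int) :
    (if out.contains s then out else out ++ [s]) = PySem.Set.add out s := rfl

theorem pvA_inner (arr : List Int) (i : Nat) (d : List Int) : ∀ (m : Nat) (s : Int),
    d = arr.drop (i + m) → s = ((arr.drop i).take m).sum →
    (PySem.List.pyRange (((i + m : Nat) : Int) + 1) (((arr.length : Nat) : Int) + 1) 1).map
      (fun j => (PySem.List.slice arr (some ((i : Nat) : Int)) (some j)).sum)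
    = pvT s d := by
  induction d with
  | nil =>
    intro m s hd _
    have hlen : arr.length ≤ i + m := by
      by_contra h
      have := List.drop_eq_nil_iff.mp hd.symm
      omega
    rw [PySem.List.pyRange_one_eq_nil (by push_cast; omega)]
    rfl
  | cons x xs ih =>
    intro m s hd hs
    have hlt : i + m < arr.length := by
      by_contra h
      rw [List.drop_eq_nil_iff.mpr (by omega)] at hd
      simp at hd
    rw [PySem.List.pyRange_one_cons (by push_cast; omega), List.map_cons]
    have hx : arr[i + m]? = some x := by
      have h0 : (arr.drop (i + m))[0]? = some x := by rw [← hd]; rfl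
      rwa [List.getElem?_drop, Nat.add_zero] at h0
    have hfirst : (PySem.List.slice arr (some ((i : Nat) : Int)) (some (((i + m : Nat) : Int) + 1))).sum = s + x := by
      have : (((i + m : Nat) : Int) + 1) = (((i + m + 1 : Nat) : Int)) := by push_cast; ring
      rw [this, PySem.List.slice_natCast]
      have htake : i + m + 1 - i = m + 1 := by omega
      rw [htake, List.take_add_one]
      have : (arr.drop i)[m]? = some x := by rw [List.getElem?_drop]; exact hx
      rw [this]
      simp [hs]
    rw [hfirst]
    have hstep : (PySem.List.pyRange (((i + m : Nat) : Int) + 1 + 1) (((arr.length : Nat) : Int) + 1) 1)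
        = (PySem.List.pyRange (((i + (m + 1) : Nat) : Int) + 1) (((arr.length : Nat) : Int) + 1) 1) := by
      push_cast; ring_nf
    rw [hstep, ih (m + 1) (s + x)
      (by rw [← Nat.add_assoc, ← List.drop_drop]; rw [← hd]; rfl)
      (by rw [List.take_add_one]
          have : (arr.drop i)[m]? = some x := by rw [List.getElem?_drop]; exact hx
          rw [this]; simp [hs])]
    rfl

theorem pvA_outer (suf : List Int) : ∀ (pre : List Int),
    (PySem.List.pyRange ((pre.length : Nat) : Int) (((pre ++ suf).length : Nat) : Int) 1).flatMap
      (fun i => (PySem.List.pyRange (i + 1) ((((pre ++ suf).length : Nat) : Int) + 1) 1).map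
        (fun j => (PySem.List.slice (pre ++ suf) (some i) (some j)).sum))
    = pvG suf := by
  induction suf with
  | nil =>
    intro pre
    rw [PySem.List.pyRange_one_eq_nil (by simp)]
    rfl
  | cons x xs ih =>
    intro pre
    have hlt : ((pre.length : Nat) : Int) < (((pre ++ x :: xs).length : Nat) : Int) := by
      simp
    rw [PySem.List.pyRange_one_cons hlt, List.flatMap_cons]
    have h1 :
        (PySem.List.pyRange (((pre.length : Nat) : Int) + 1) ((((pre ++ x :: xs).length : Nat) : Int) + 1) 1).map
          (fun j => (PySem.List.slice (pre ++ x :: xs) (some ((pre.length : Nat) : Int)) (some j)).sum)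
        = pvT 0 (x :: xs) := by
      have := pvA_inner (pre ++ x :: xs) pre.length (x :: xs) 0 0
        (by simp) (by simp)
      simpa using this
    have h2 :
        (PySem.List.pyRange (((pre.length : Nat) : Int) + 1) (((pre ++ x :: xs).length : Nat) : Int) 1).flatMap
          (fun i => (PySem.List.pyRange (i + 1) ((((pre ++ x :: xs).length : Nat) : Int) + 1) 1).map
            (fun j => (PySem.List.slice (pre ++ x :: xs) (some i) (some j)).sum))
        = pvG xs := by
      have := ih (pre ++ [x])
      have e : pre ++ [x] ++ xs = pre ++ x :: xs := by simp
      rw [e] at this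
      have e2 : (((pre ++ [x]).length : Nat) : Int) = ((pre.length : Nat) : Int) + 1 := by
        simp
      rw [e2] at this
      exact this
    rw [h1, h2]
    rfl

theorem pvB_pref (suf : List Int) : ∀ (p : List Int) (s : Int),
    (suf.foldl (fun (q : List Int × Int) x => (q.1 ++ [q.2 + x], q.2 + x)) (p ++ [s], s)).1
    = (p ++ [s]) ++ pvT s suf := by
  induction suf with
  | nil => intro p s; simp [pvT]
  | cons x xs ih =>
    intro p s
    have := ih (p ++ [s]) (s + x)
    simp only [List.foldl_cons]
    rw [this]
    simp [pvT]

theorem pvB_flat (suf : List Int) : ∀ (pre : List Int),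
    (PySem.List.enumerate suf ((pre.length : Nat) : Int)).flatMap (fun ip =>
      (PySem.List.slice (pre ++ suf) (some (ip.1 + 1)) none).map (fun pj => pj - ip.2))
    = pvF suf := by
  induction suf with
  | nil => intro pre; simp [PySem.List.enumerate_nil, pvF]
  | cons p q ih =>
    intro pre
    rw [PySem.List.enumerate_cons, List.flatMap_cons]
    have h1 : (PySem.List.slice (pre ++ p :: q) (some (((pre.length : Nat) : Int) + 1)) none) = q := by
      have : (((pre.length : Nat) : Int) + 1) = (((pre.length + 1 : Nat) : Int)) := by push_cast; ring
      rw [this, PySem.List.slice_from_natCast]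
      rw [← List.drop_drop, List.drop_left]
      rfl
    have h2 := ih (pre ++ [p])
    have e : pre ++ [p] ++ q = pre ++ p :: q := by simp
    rw [e] at h2
    have e2 : (((pre ++ [p]).length : Nat) : Int) = ((pre.length : Nat) : Int) + 1 := by simp
    rw [e2] at h2
    rw [h1, h2]
    rfl

theorem pvT_map_sub (l : List Int) : ∀ (s c : Int),
    (pvT s l).map (fun y => y - c) = pvT (s - c) l := by
  induction l with
  | nil => intro s c; rfl
  | cons x xs ih =>
    intro s c
    simp only [pvT, List.map_cons, ih]
    have h1 : s + x - c = s - c + x := by ring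
    rw [h1]

theorem pvF_T (l : List Int) : ∀ (s : Int), pvF (pvT s l) = pvG'' l := by
  induction l with
  | nil => intro s; rfl
  | cons x xs ih =>
    intro s
    simp only [pvT, pvF, pvG'']
    rw [pvT_map_sub, ih]
    simp

theorem pvT_G'' (l : List Int) : pvT 0 l ++ pvG'' l = pvG l := by
  induction l with
  | nil => rfl
  | cons x xs ih =>
    simp only [pvG'', pvG]
    rw [← ih]

theorem pvA_eq (arr : List Int) :
    SumsOfSubarrays arr = ((PySem.Set.ofList (pvG arr)).length : Int) := by
  unfold SumsOfSubarrays
  simp only [pv_add_eq]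
  have hfold :
      (PySem.List.pyRange 0 ((arr.length : Nat) : Int) 1).foldl (fun out i =>
        (PySem.List.pyRange (i + 1) (((arr.length : Nat) : Int) + 1) 1).foldl (fun out j =>
          PySem.Set.add out ((PySem.List.slice arr (some i) (some j)).sum)) out) ([] : List Int)
      = (pvG arr).foldl PySem.Set.add [] := by
    rw [← pvA_outer arr []]
    rw [pv_foldl_flatMap]
    simp only [List.foldl_map]
    simp
  rw [hfold]
  rfl

theorem pvB_eq (arr : List Int) :
    SumsOfSubarrays_alt arr = ((PySem.Set.ofList (pvG arr)).length : Int) := by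
  have h0 : SumsOfSubarrays_alt arr = PySem.Set.len (PySem.Set.ofList
      ((PySem.List.enumerate ((arr.foldl (fun (p : List Int × Int) x => (p.1 ++ [p.2 + x], p.2 + x)) ([0], 0)).1)).flatMap (fun ip =>
        (PySem.List.slice ((arr.foldl (fun (p : List Int × Int) x => (p.1 ++ [p.2 + x], p.2 + x)) ([0], 0)).1) (some (ip.1 + 1)) none).map (fun pj => pj - ip.2)))) := rfl
  rw [h0]
  have hpref : (arr.foldl (fun (p : List Int × Int) x => (p.1 ++ [p.2 + x], p.2 + x)) (([0] : List Int), (0 : Int))).1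
      = 0 :: pvT 0 arr := by
    have := pvB_pref arr [] 0
    simpa using this
  rw [hpref]
  have hflat := pvB_flat (0 :: pvT 0 arr) []
  have e2 : ((([] : List Int).length : Nat) : Int) = 0 := by simp
  rw [e2] at hflat
  simp only [List.nil_append] at hflat
  rw [hflat]
  have hF : pvF (0 :: pvT 0 arr) = pvG arr := by
    simp only [pvF]
    have m1 : (pvT 0 arr).map (fun y => y - (0 : Int)) = pvT 0 arr := by simp
    rw [m1, pvF_T arr 0]
    exact pvT_G'' arr
  rw [hF]
  rfl

-- ===== VERDICT (by name: the statement is the Claim_ definition above) =====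
theorem SumsOfSubarrays_spec : Claim_equal_SumsOfSubarrays := by
  intro arr _
  unfold Spec_SumsOfSubarrays
  rw [pvA_eq, pvB_eq]
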